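-- pv_equiv track=rewrite | github.com/Grihanovsky/5d-chess-with-multiverse-timetravel | logic.py | Board_set_up
-- ===== SOURCE A (Python) =====
-- def Board_set_up(size,black_up): # finished
--     List =  ["WRA", "WKB", "WBC", "WQQ", "WKK", "WBF", "WKG", "WRH", "WPA", "WPB", "WPC", "WPD", "WPE", "WPF", "WPG", "WPH"]
--     List2 = ["BRA", "BKB", "BBC", "BQQ", "BKK", "BBF", "BKG", "BRH", "BPA", "BPB", "BPC", "BPD", "BPE", "BPF", "BPG", "BPH"]
--     List3 =  ["WRA", "WKB", "WBC","WKK", "WQQ", "WBF", "WKG", "WRH", "WPA", "WPB", "WPC", "WPD", "WPE", "WPF", "WPG", "WPH"]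
--     List4 = ["BRA", "BKB", "BBC", "BKK", "BQQ", "BBF", "BKG", "BRH", "BPA", "BPB", "BPC", "BPD", "BPE", "BPF", "BPG", "BPH"]
--
--
--     board = [["0" for i in range(size)] for j in range(size)]
--     counter = 1
--
--     for i in range(size):
--         counter += 1
--         for j in range(size):
--                 counter += 1
--
--                 if black_up:
--                     if i == 0:
--                         board[i][j] = f"{List2[j]}---?-?"
--                     elif i == 1:
--                         board[i][j] = f"{List2[j+8]}---?-?"
--                     elif i == 6:
--                         board[i][j] = f"{List[j+8]}---?-?"
--                     elif i == 7:
--                         board[i][j] = f"{List[j]}---?-?"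
--                     else:
--                         board[i][j] = f"nnn---?-?"
--                 else:
--                     if i == 0:
--                         board[i][j] = f"{List3[j]}---?-?"
--                     elif i == 1:
--                         board[i][j] = f"{List3[j+8]}---?-?"
--                     elif i == 6:
--                         board[i][j] = f"{List4[j+8]}---?-?"
--                     elif i == 7:
--                         board[i][j] = f"{List4[j]}---?-?"
--                     else:
--                         board[i][j] = f"nnn---?-?"
--
--     return board
-- ===== SOURCE B (Python) =====
-- def Board_set_up(size, black_up):
--     if black_up:
--         top_back = ["BRA", "BKB", "BBC", "BQQ", "BKK", "BBF", "BKG", "BRH"]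
--         top_pawn = ["BPA", "BPB", "BPC", "BPD", "BPE", "BPF", "BPG", "BPH"]
--         bot_back = ["WRA", "WKB", "WBC", "WQQ", "WKK", "WBF", "WKG", "WRH"]
--         bot_pawn = ["WPA", "WPB", "WPC", "WPD", "WPE", "WPF", "WPG", "WPH"]
--     else:
--         top_back = ["WRA", "WKB", "WBC", "WKK", "WQQ", "WBF", "WKG", "WRH"]
--         top_pawn = ["WPA", "WPB", "WPC", "WPD", "WPE", "WPF", "WPG", "WPH"]
--         bot_back = ["BRA", "BKB", "BBC", "BKK", "BQQ", "BBF", "BKG", "BRH"]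
--         bot_pawn = ["BPA", "BPB", "BPC", "BPD", "BPE", "BPF", "BPG", "BPH"]
--     board = [["nnn---?-?"] * size for _ in range(size)]
--     for row, pieces in ((0, top_back), (1, top_pawn), (6, bot_pawn), (7, bot_back)):
--         if row < size:
--             board[row] = [p + "---?-?" for p in pieces[:size]]
--     return board
-- ===== Notes on version B (the rewrite author's own statement) =====
-- stated objective: simpler
-- what changed: Replaces the per-cell nested loop with 5-way branching and a dead counter by a default-filled grid that is patched row-by-row from four 8-element piece lists selected once by black_up.
import Mathlib
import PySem

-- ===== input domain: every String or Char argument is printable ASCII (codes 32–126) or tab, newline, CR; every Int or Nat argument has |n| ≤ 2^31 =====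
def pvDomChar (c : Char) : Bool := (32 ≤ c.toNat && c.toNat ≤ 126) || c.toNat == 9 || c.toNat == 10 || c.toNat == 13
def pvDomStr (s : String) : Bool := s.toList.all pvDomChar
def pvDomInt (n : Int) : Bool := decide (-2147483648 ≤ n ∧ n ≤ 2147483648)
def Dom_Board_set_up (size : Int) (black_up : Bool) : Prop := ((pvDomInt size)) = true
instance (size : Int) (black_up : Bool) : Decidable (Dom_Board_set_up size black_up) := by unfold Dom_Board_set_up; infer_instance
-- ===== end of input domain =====

-- B replaces A's per-cell nested loop (5-way branch per cell, dead counter) by a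
-- default-filled grid patched row-by-row from four piece lists selected once by black_up;
-- objective: simpler.

-- ===== PORT A =====
def Board_set_up (size : Int) (black_up : Bool) : List (List String) :=
  let L  : List String := ["WRA", "WKB", "WBC", "WQQ", "WKK", "WBF", "WKG", "WRH", "WPA", "WPB", "WPC", "WPD", "WPE", "WPF", "WPG", "WPH"]
  let L2 : List String := ["BRA", "BKB", "BBC", "BQQ", "BKK", "BBF", "BKG", "BRH", "BPA", "BPB", "BPC", "BPD", "BPE", "BPF", "BPG", "BPH"]
  let L3 : List String := ["WRA", "WKB", "WBC", "WKK", "WQQ", "WBF", "WKG", "WRH", "WPA", "WPB", "WPC", "WPD", "WPE", "WPF", "WPG", "WPH"]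
  let L4 : List String := ["BRA", "BKB", "BBC", "BKK", "BQQ", "BBF", "BKG", "BRH", "BPA", "BPB", "BPC", "BPD", "BPE", "BPF", "BPG", "BPH"]
  let board0 : List (List String) :=
    (PySem.List.pyRange 0 size 1).map (fun _ => (PySem.List.pyRange 0 size 1).map (fun _ => "0"))
  let res : List (List String) × Int :=
    (PySem.List.pyRange 0 size 1).foldl (fun st i =>
      let st1 : List (List String) × Int := (st.1, st.2 + 1)
      (PySem.List.pyRange 0 size 1).foldl (fun st2 j =>
        let counter := st2.2 + 1
        let v : String :=
          if black_up then
            if i = 0 then (PySem.List.pyGetD L2 j "") ++ "---?-?"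
            else if i = 1 then (PySem.List.pyGetD L2 (j + 8) "") ++ "---?-?"
            else if i = 6 then (PySem.List.pyGetD L (j + 8) "") ++ "---?-?"
            else if i = 7 then (PySem.List.pyGetD L j "") ++ "---?-?"
            else "nnn---?-?"
          else
            if i = 0 then (PySem.List.pyGetD L3 j "") ++ "---?-?"
            else if i = 1 then (PySem.List.pyGetD L3 (j + 8) "") ++ "---?-?"
            else if i = 6 then (PySem.List.pyGetD L4 (j + 8) "") ++ "---?-?"
            else if i = 7 then (PySem.List.pyGetD L4 j "") ++ "---?-?"
            else "nnn---?-?"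
        (PySem.List.pySetD st2.1 i (PySem.List.pySetD (PySem.List.pyGetD st2.1 i []) j v), counter)
      ) st1
    ) (board0, 1)
  res.1

-- ===== PORT B =====
def Board_set_up_alt (size : Int) (black_up : Bool) : List (List String) :=
  let topBack : List String := if black_up then ["BRA", "BKB", "BBC", "BQQ", "BKK", "BBF", "BKG", "BRH"]
                               else ["WRA", "WKB", "WBC", "WKK", "WQQ", "WBF", "WKG", "WRH"]
  let topPawn : List String := if black_up then ["BPA", "BPB", "BPC", "BPD", "BPE", "BPF", "BPG", "BPH"]
                               else ["WPA", "WPB", "WPC", "WPD", "WPE", "WPF", "WPG", "WPH"]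
  let botBack : List String := if black_up then ["WRA", "WKB", "WBC", "WQQ", "WKK", "WBF", "WKG", "WRH"]
                               else ["BRA", "BKB", "BBC", "BKK", "BQQ", "BBF", "BKG", "BRH"]
  let botPawn : List String := if black_up then ["WPA", "WPB", "WPC", "WPD", "WPE", "WPF", "WPG", "WPH"]
                               else ["BPA", "BPB", "BPC", "BPD", "BPE", "BPF", "BPG", "BPH"]
  let board : List (List String) :=
    (PySem.List.pyRange 0 size 1).map (fun _ => List.replicate size.toNat "nnn---?-?")
  [((0 : Int), topBack), (1, topPawn), (6, botPawn), (7, botBack)].foldl (fun bd rp =>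
    if rp.1 < size then
      PySem.List.pySetD bd rp.1 ((PySem.List.slice rp.2 none (some size)).map (fun p => p ++ "---?-?"))
    else bd
  ) board

-- ===== PRECONDITION & SPEC =====
-- A raises IndexError for size ≥ 9 (pawn-row index j+8 runs past the 16-element lists); Pre_ excludes exactly those.
def Pre_Board_set_up (size : Int) (black_up : Bool) : Prop := size ≤ 8
instance (size : Int) (black_up : Bool) : Decidable (Pre_Board_set_up size black_up) := by unfold Pre_Board_set_up; infer_instance
def pvWitness_Board_set_up : Int × Bool := (8, true)

def Spec_Board_set_up (size : Int) (black_up : Bool) (out : List (List String)) : Prop := out = Board_set_up_alt size black_up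
instance (size : Int) (black_up : Bool) (out : List (List String)) : Decidable (Spec_Board_set_up size black_up out) := by unfold Spec_Board_set_up; infer_instance

-- ===== CLAIM (what is proved, stated in full; the proofs are below) =====
def Claim_equal_Board_set_up : Prop := ∀ (size : Int) (black_up : Bool), Dom_Board_set_up size black_up → Pre_Board_set_up size black_up → Spec_Board_set_up size black_up (Board_set_up size black_up)

-- ===== LEMMAS AND PROOFS =====
theorem pyRange_nonpos_nil (n : Int) (h : n ≤ 0) : PySem.List.pyRange 0 n 1 = [] := by
  rw [List.eq_nil_iff_forall_not_mem]
  intro x hx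
  rw [PySem.List.mem_pyRange_one] at hx
  omega

-- ===== VERDICT (by name: the statement is the Claim_ definition above) =====
set_option maxRecDepth 40000 in
theorem Board_set_up_spec : Claim_equal_Board_set_up := by
  intro size black_up _ hpre
  unfold Spec_Board_set_up
  unfold Pre_Board_set_up at hpre
  by_cases hp : 1 ≤ size
  · interval_cases size <;> cases black_up <;> decide
  · simp only [Board_set_up, Board_set_up_alt, pyRange_nonpos_nil size (by omega),
      List.map_nil, List.foldl_nil]
    have h1 : ¬ ((0 : Int) < size) := by omega
    have h2 : ¬ ((1 : Int) < size) := by omega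
    have h6 : ¬ ((6 : Int) < size) := by omega
    have h7 : ¬ ((7 : Int) < size) := by omega
    simp [h1, h2, h6, h7]
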